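-- pv_equiv track=rewrite | github.com/shutpa01/cryptic_solver_v2 | scraper/orchestrator/explanation_pipeline.py | _word_spans_letters_only
-- ===== SOURCE A (Python) =====
-- def _word_spans_letters_only(clue_text: str) -> list:
--     """Word spans in letters-only coordinates."""
--     spans = []
--     idx = 0
--     in_word = False
--     start = 0
--
--     for ch in clue_text:
--         if ch.isalpha():
--             if not in_word:
--                 in_word = True
--                 start = idx
--             idx += 1
--         else:
--             if in_word:
--                 spans.append((start, idx))
--                 in_word = False
--
--     if in_word:
--         spans.append((start, idx))
--
--     return spans
-- ===== SOURCE B (Python) =====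
-- from itertools import groupby
--
-- def _word_spans_letters_only(clue_text: str) -> list:
--     """Word spans in letters-only coordinates."""
--     spans = []
--     pos = 0
--     for is_alpha, group in groupby(clue_text, key=str.isalpha):
--         n = sum(1 for _ in group)
--         if is_alpha:
--             spans.append((pos, pos + n))
--             pos += n
--     return spans
-- ===== Notes on version B (the rewrite author's own statement) =====
-- stated objective: alternative
-- what changed: Replaces A's per-character state machine (in_word flag, start variable, trailing flush) with an itertools.groupby segmentation into maximal alpha/non-alpha runs and a single letters-only cursor advanced per run.
import Mathlib
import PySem

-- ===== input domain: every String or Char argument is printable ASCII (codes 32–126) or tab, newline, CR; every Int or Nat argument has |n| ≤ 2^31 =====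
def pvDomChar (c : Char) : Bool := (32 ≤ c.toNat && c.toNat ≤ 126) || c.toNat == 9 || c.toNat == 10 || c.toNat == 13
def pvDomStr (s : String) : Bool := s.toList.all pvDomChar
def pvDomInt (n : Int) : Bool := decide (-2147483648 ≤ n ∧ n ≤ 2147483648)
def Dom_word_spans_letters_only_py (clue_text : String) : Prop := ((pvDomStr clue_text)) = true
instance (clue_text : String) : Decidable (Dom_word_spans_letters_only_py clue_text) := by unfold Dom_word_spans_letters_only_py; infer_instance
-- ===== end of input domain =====

-- B replaces A's in_word/start state machine with a groupby-style scan over maximal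
-- same-kind runs and a single letters-only cursor (objective: alternative decomposition).

-- ===== PORT A =====
-- state: (spans, idx, in_word, start)
def pvAStep (st : List (Int × Int) × Int × Bool × Int) (ch : Char) :
    List (Int × Int) × Int × Bool × Int :=
  let (spans, idx, in_word, start) := st
  if PySem.Chars.isalpha ch then
    if !in_word then (spans, idx + 1, true, idx)
    else (spans, idx + 1, in_word, start)
  else
    if in_word then (spans ++ [(start, idx)], idx, false, start)
    else (spans, idx, in_word, start)

def word_spans_letters_only_py (clue_text : String) : List (Int × Int) :=
  let st := clue_text.toList.foldl pvAStep ([], 0, false, 0)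
  let (spans, idx, in_word, start) := st
  if in_word then spans ++ [(start, idx)] else spans

-- ===== PORT B =====
-- groupby(clue_text, key=str.isalpha): peel one maximal run of same-kind chars at a time
def pvBGo : List Char → Int → List (Int × Int)
  | [], _ => []
  | c :: cs, pos =>
    let k := fun x => PySem.Chars.isalpha x == PySem.Chars.isalpha c
    let n : Int := ((c :: cs).takeWhile k).length
    let rest := (c :: cs).dropWhile k
    if PySem.Chars.isalpha c then (pos, pos + n) :: pvBGo rest (pos + n)
    else pvBGo rest pos
termination_by l _ => l.length
decreasing_by
  all_goals
    simp only [List.dropWhile_cons, BEq.rfl, if_pos]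
    exact Nat.lt_succ_of_le (List.length_dropWhile_le _ _)

def word_spans_letters_only_py_alt (clue_text : String) : List (Int × Int) :=
  pvBGo clue_text.toList 0

-- ===== PRECONDITION & SPEC =====
def Spec_word_spans_letters_only_py (clue_text : String) (out : List (Int × Int)) : Prop := out = word_spans_letters_only_py_alt clue_text
instance (clue_text : String) (out : List (Int × Int)) : Decidable (Spec_word_spans_letters_only_py clue_text out) := by unfold Spec_word_spans_letters_only_py; infer_instance

-- ===== CLAIM (what is proved, stated in full; the proofs are below) =====
def Claim_equal_word_spans_letters_only_py : Prop := ∀ (clue_text : String), Dom_word_spans_letters_only_py clue_text → Spec_word_spans_letters_only_py clue_text (word_spans_letters_only_py clue_text)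

-- ===== LEMMAS AND PROOFS =====

-- char-at-a-time reference versions (proof helpers): goChar = not in a word, goIn = inside a word
mutual
def pvGoChar : List Char → Int → List (Int × Int)
  | [], _ => []
  | c :: cs, pos =>
    if PySem.Chars.isalpha c then pvGoIn cs (pos + 1) pos else pvGoChar cs pos

def pvGoIn : List Char → Int → Int → List (Int × Int)
  | [], idx, start => [(start, idx)]
  | c :: cs, idx, start =>
    if PySem.Chars.isalpha c then pvGoIn cs (idx + 1) start
    else (start, idx) :: pvGoChar cs idx
end

-- A's fold-then-flush equals the char-at-a-time recursions, for both loop states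
theorem pvA_eq_goChar (l : List Char) :
    ∀ spans idx start,
      ((let st := l.foldl pvAStep (spans, idx, false, start)
        let (sp, i, iw, st0) := st
        if iw then sp ++ [(st0, i)] else sp) = spans ++ pvGoChar l idx)
      ∧ ((let st := l.foldl pvAStep (spans, idx, true, start)
        let (sp, i, iw, st0) := st
        if iw then sp ++ [(st0, i)] else sp) = spans ++ pvGoIn l idx start) := by
  induction l with
  | nil => intro spans idx start; simp [pvGoChar, pvGoIn]
  | cons c cs ih =>
    intro spans idx start
    by_cases h : PySem.Chars.isalpha c = true
    · constructor
      · simp only [List.foldl_cons, pvAStep, h, if_pos, Bool.not_false, pvGoChar]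
        exact (ih spans (idx + 1) idx).2
      · simp only [List.foldl_cons, pvAStep, h, if_pos, Bool.not_true, Bool.false_eq_true,
          if_false, pvGoIn]
        exact (ih spans (idx + 1) start).2
    · simp only [Bool.not_eq_true] at h
      constructor
      · simp only [List.foldl_cons, pvAStep, h, Bool.false_eq_true, if_false, pvGoChar]
        exact (ih spans idx start).1
      · simp only [List.foldl_cons, pvAStep, h, Bool.false_eq_true, if_false, if_true, pvGoIn]
        have := (ih (spans ++ [(start, idx)]) idx start).1
        simpa [List.append_assoc] using this

-- skipping non-letters one at a time = dropping the whole non-letter run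
theorem pvGoChar_dropWhile (l : List Char) (pos : Int) :
    pvGoChar l pos = pvGoChar (l.dropWhile (fun x => !PySem.Chars.isalpha x)) pos := by
  induction l with
  | nil => rfl
  | cons c cs ih =>
    by_cases h : PySem.Chars.isalpha c = true
    · simp [h]
    · simp only [Bool.not_eq_true] at h
      simp [pvGoChar, h, ih]

-- inside a word: the rest of the word is the leading alpha run
theorem pvGoIn_eq (l : List Char) :
    ∀ idx start,
      pvGoIn l idx start =
        (start, idx + ((l.takeWhile (fun x => PySem.Chars.isalpha x)).length : Int)) ::
          pvGoChar (l.dropWhile (fun x => PySem.Chars.isalpha x))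
            (idx + ((l.takeWhile (fun x => PySem.Chars.isalpha x)).length : Int)) := by
  induction l with
  | nil => intro idx start; simp [pvGoIn, pvGoChar]
  | cons c cs ih =>
    intro idx start
    by_cases h : PySem.Chars.isalpha c = true
    · simp only [pvGoIn, h, if_pos, List.takeWhile_cons, List.dropWhile_cons, List.length_cons,
        ih (idx + 1) start]
      push_cast
      ring_nf
    · simp only [Bool.not_eq_true] at h
      simp [pvGoIn, h, pvGoChar]

-- B's run-based scan equals the char-at-a-time scan
theorem pvBGo_eq_goChar (l : List Char) (pos : Int) :
    pvBGo l pos = pvGoChar l pos := by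
  induction hn : l.length using Nat.strong_induction_on generalizing l pos with
  | _ n ih =>
    match l with
    | [] => simp [pvBGo, pvGoChar]
    | c :: cs =>
      by_cases h : PySem.Chars.isalpha c = true
      · have hk : (fun x => PySem.Chars.isalpha x == PySem.Chars.isalpha c)
            = (fun x => PySem.Chars.isalpha x) := by
          funext x; simp [h]
        rw [pvBGo, hk]
        simp only [List.takeWhile_cons, List.dropWhile_cons, h, if_pos, List.length_cons]
        rw [ih _ (by subst hn; exact Nat.lt_succ_of_le (List.length_dropWhile_le _ _)) _ _ rfl]
        rw [show pvGoChar (c :: cs) pos = pvGoIn cs (pos + 1) pos by simp [pvGoChar, h]]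
        rw [pvGoIn_eq]
        rw [show pos + 1 + ((List.takeWhile (fun x => PySem.Chars.isalpha x) cs).length : Int)
            = pos + (((List.takeWhile (fun x => PySem.Chars.isalpha x) cs).length + 1 : Nat) : Int) by
          push_cast; ring]
      · simp only [Bool.not_eq_true] at h
        have hk : (fun x => PySem.Chars.isalpha x == PySem.Chars.isalpha c)
            = (fun x => !PySem.Chars.isalpha x) := by
          funext x; simp [h]
        rw [pvBGo, hk]
        simp only [List.dropWhile_cons, h, Bool.not_false, Bool.false_eq_true, if_false, if_true]
        rw [ih _ (by subst hn; exact Nat.lt_succ_of_le (List.length_dropWhile_le _ _)) _ _ rfl]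
        rw [pvGoChar_dropWhile (c :: cs) pos]
        simp [h]

-- ===== VERDICT (by name: the statement is the Claim_ definition above) =====
theorem word_spans_letters_only_py_spec : Claim_equal_word_spans_letters_only_py := by
  intro clue_text _
  show word_spans_letters_only_py clue_text = word_spans_letters_only_py_alt clue_text
  unfold word_spans_letters_only_py word_spans_letters_only_py_alt
  rw [pvBGo_eq_goChar]
  simpa using (pvA_eq_goChar clue_text.toList [] 0 0).1
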